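-- pv_equiv track=rewrite | github.com/wangbingbo2019/CSon | utils/utils.py | find_max_drop_index
-- ===== SOURCE A (Python) =====
-- def find_max_drop_index(nums):
--     if len(nums) < 2:
--         return None
--
--     max_diff = nums[0] - nums[1]
--     max_index = 0
--
--     for i in range(1, len(nums) - 1):
--         current_diff = nums[i] - nums[i + 1]
--         if current_diff > max_diff:
--             max_diff = current_diff
--             max_index = i
--
--     return max_index
-- ===== SOURCE B (Python) =====
-- def find_max_drop_index(nums):
--     if len(nums) < 2:
--         return None
--     diffs = [nums[i] - nums[i + 1] for i in range(len(nums) - 1)]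
--     return diffs.index(max(diffs))
-- ===== Notes on version B (the rewrite author's own statement) =====
-- stated objective: simpler
-- what changed: B builds the full table of consecutive drops in one comprehension and then locates the maximum with max()+.index() (first occurrence, matching A's tie-break), instead of A's inline running-max/running-index loop.
import Mathlib
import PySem

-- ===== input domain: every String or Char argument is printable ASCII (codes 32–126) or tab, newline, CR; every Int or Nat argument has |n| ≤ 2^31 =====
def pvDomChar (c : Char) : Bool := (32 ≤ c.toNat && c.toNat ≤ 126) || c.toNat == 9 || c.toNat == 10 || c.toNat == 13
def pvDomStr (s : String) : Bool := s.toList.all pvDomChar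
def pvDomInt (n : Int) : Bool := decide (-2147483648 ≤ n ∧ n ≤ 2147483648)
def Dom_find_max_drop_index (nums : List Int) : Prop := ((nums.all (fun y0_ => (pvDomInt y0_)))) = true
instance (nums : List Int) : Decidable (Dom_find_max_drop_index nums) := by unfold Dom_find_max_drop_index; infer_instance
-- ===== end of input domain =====

-- B builds the full table of consecutive drops, then returns the index of its maximum
-- (max + first .index, same tie-break); A tracks the running max and its index inline.
-- Objective: simpler decomposition; same O(n) cost.

-- ===== PORT A =====
def find_max_drop_index (nums : List Int) : Option Int :=
  if nums.length < 2 then none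
  else
    let st := (PySem.List.pyRange 1 ((nums.length : Int) - 1) 1).foldl
      (fun (s : Int × Int) i =>
        let current_diff := PySem.List.pyGetD nums i 0 - PySem.List.pyGetD nums (i + 1) 0
        if current_diff > s.1 then (current_diff, i) else s)
      (PySem.List.pyGetD nums 0 0 - PySem.List.pyGetD nums 1 0, 0)
    some st.2

-- ===== PORT B =====
def find_max_drop_index_alt (nums : List Int) : Option Int :=
  if nums.length < 2 then none
  else
    let diffs := (PySem.List.pyRange 0 ((nums.length : Int) - 1) 1).map
      (fun i => PySem.List.pyGetD nums i 0 - PySem.List.pyGetD nums (i + 1) 0)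
    match PySem.List.max? diffs (fun y => y) with
    | some m => (PySem.List.index? diffs m).map (fun k => (k : Int))
    | none => none  -- unreachable: diffs is nonempty when len(nums) ≥ 2 (ValueError branch of .index never fires)

-- ===== PRECONDITION & SPEC =====
def Spec_find_max_drop_index (nums : List Int) (out : Option Int) : Prop := out = find_max_drop_index_alt nums
instance (nums : List Int) (out : Option Int) : Decidable (Spec_find_max_drop_index nums out) := by unfold Spec_find_max_drop_index; infer_instance

-- ===== CLAIM (what is proved, stated in full; the proofs are below) =====
def Claim_equal_find_max_drop_index : Prop := ∀ (nums : List Int), Dom_find_max_drop_index nums → Spec_find_max_drop_index nums (find_max_drop_index nums)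

-- ===== LEMMAS AND PROOFS =====

-- The running-max fold of A over indices 1..m-1 lands on the first maximum of the
-- difference table over indices 0..m-1, which is what B's max+index computes.
theorem pv_main (g : Int → Int) (m : Nat) (hm : 1 ≤ m) :
    let st := (PySem.List.pyRange 1 (m : Int) 1).foldl
      (fun (s : Int × Int) i => if g i > s.1 then (g i, i) else s) (g 0, 0)
    let diffs := (PySem.List.pyRange 0 (m : Int) 1).map g
    PySem.List.max? diffs (fun y => y) = some st.1 ∧
      PySem.List.index? diffs st.1 = some st.2.toNat ∧ 0 ≤ st.2 ∧ st.2 < (m : Int) := by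
  induction m with
  | zero => omega
  | succ m ih =>
    intro st diffs
    rcases Nat.eq_or_lt_of_le hm with h1 | h1
    · -- m + 1 = 1
      have hm0 : m = 0 := by omega
      subst hm0
      refine ⟨?_, ?_, ?_, ?_⟩ <;> simp [st, diffs, PySem.List.pyRange, PySem.List.max?,
        PySem.List.index?]
    · have hm' : 1 ≤ m := by omega
      have ⟨h1', h2', h3', h4'⟩ := ih hm'
      set stp := (PySem.List.pyRange 1 (m : Int) 1).foldl
        (fun (s : Int × Int) i => if g i > s.1 then (g i, i) else s) (g 0, 0) with hstp
      set dp := (PySem.List.pyRange 0 (m : Int) 1).map g with hdp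
      -- peel the last index m off both ranges
      have e1 : ((m + 1 : Nat) : Int) = (m : Int) + 1 := by push_cast; ring
      have hr1 : PySem.List.pyRange 1 ((m : Int) + 1) 1
          = PySem.List.pyRange 1 (m : Int) 1 ++ [(m : Int)] :=
        PySem.List.pyRange_one_succ_right (a := 1) (b := (m : Int)) (by exact_mod_cast hm')
      have hr0 : PySem.List.pyRange 0 ((m : Int) + 1) 1
          = PySem.List.pyRange 0 (m : Int) 1 ++ [(m : Int)] :=
        PySem.List.pyRange_one_succ_right (a := 0) (b := (m : Int)) (by positivity)
      have hst : st = if g (m : Int) > stp.1 then (g (m : Int), (m : Int)) else stp := by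
        simp only [st, e1, hr1, List.foldl_append, List.foldl_cons, List.foldl_nil, ← hstp]
      have hdiffs : diffs = dp ++ [g (m : Int)] := by
        simp only [diffs, e1, hr0, List.map_append, List.map_cons, List.map_nil, ← hdp]
      -- dp is nonempty; write it as a cons to use max?_id_cons
      obtain ⟨d, t, hdt⟩ : ∃ d t, dp = d :: t := by
        cases hdpc : dp with
        | nil => rw [hdpc] at h1'; simp [PySem.List.max?] at h1'
        | cons d t => exact ⟨d, t, rfl⟩
      have hmaxdp : t.foldl max d = stp.1 := by
        have := PySem.List.max?_id_cons (x := d) (t := t)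
        rw [hdt] at h1'; rw [this] at h1'; exact Option.some.inj h1'
      have hmax' : PySem.List.max? diffs (fun y => y)
          = some (max stp.1 (g (m : Int))) := by
        have := PySem.List.max?_id_cons (x := d) (t := t ++ [g (m : Int)])
        rw [hdiffs, hdt, List.cons_append, this, List.foldl_append, hmaxdp]
        rfl
      have hlen : dp.length = m := by
        simp [hdp, PySem.List.length_pyRange_one]
      have hmem : stp.1 ∈ dp := by
        have := PySem.List.index?_isSome_iff (xs := dp) (v := stp.1)
        rw [h2'] at this; simpa using this
      by_cases hc : g (m : Int) > stp.1
      · have hnotm : stp.1 ≠ g (m : Int) := by intro h; rw [h] at hc; exact lt_irrefl _ hc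
        have hnin : g (m : Int) ∉ dp := by
          intro hin
          have := PySem.List.max?_isMax (xs := dp) (key := fun y => y) (m := stp.1) h1' _ hin
          simp at this; omega
        refine ⟨?_, ?_, ?_, ?_⟩
        · rw [hmax', hst]; simp [hc, max_eq_right (le_of_lt hc)]
        · rw [hdiffs, hst]
          simp only [hc, if_pos]
          rw [PySem.List.index?_append_singleton_self _ _ hnin, hlen]
          simp
        · rw [hst]; simp [hc]
        · rw [hst]; simp [hc]
      · refine ⟨?_, ?_, ?_, ?_⟩
        · rw [hmax', hst]; simp [hc, max_eq_left (by omega : g (m : Int) ≤ stp.1)]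
        · rw [hdiffs, hst]
          simp only [hc, if_false]
          rw [PySem.List.index?_append_of_mem _ hmem]
          exact h2'
        · rw [hst]; simp [hc]; exact h3'
        · rw [hst]; simp [hc]; omega

-- ===== VERDICT (by name: the statement is the Claim_ definition above) =====
theorem find_max_drop_index_spec : Claim_equal_find_max_drop_index := by
  intro nums _
  unfold Spec_find_max_drop_index find_max_drop_index find_max_drop_index_alt
  by_cases hlt : nums.length < 2
  · simp [hlt]
  · simp only [hlt, if_false]
    have hm : 1 ≤ nums.length - 1 := by omega
    have hcast : ((nums.length : Int) - 1) = ((nums.length - 1 : Nat) : Int) := by omega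
    rw [hcast]
    have ⟨h1, h2, h3, _⟩ := pv_main
      (fun i => PySem.List.pyGetD nums i 0 - PySem.List.pyGetD nums (i + 1) 0)
      (nums.length - 1) hm
    have e01 : PySem.List.pyGetD nums (0 + 1) 0 = PySem.List.pyGetD nums 1 0 := by norm_num
    simp only [e01] at h1 h2 h3
    rw [h1]
    simp only [gt_iff_lt, PySem.List.index?_eq_idxOf?] at h2
    simp [h2, Int.toNat_of_nonneg h3]
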